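-- pv_equiv track=rewrite | github.com/clawhi-leonard/poker-now-agent | plo_betting.py | is_wet_plo_board
-- ===== SOURCE A (Python) =====
-- def is_wet_plo_board(board):
--     """
--     Determine if board is wet for PLO (more loose than Hold'em)
--     PLO has more drawing combinations, so boards are "wetter"
--     """
--     if len(board) < 3:
--         return False
--
--     # Extract ranks and suits
--     ranks = [card[0] for card in board]
--     suits = [card[1] for card in board]
--
--     # Convert face cards to numbers
--     rank_map = {'T': 10, 'J': 11, 'Q': 12, 'K': 13, 'A': 14}
--     numeric_ranks = []
--     for r in ranks:
--         if r.isdigit():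
--             numeric_ranks.append(int(r))
--         else:
--             numeric_ranks.append(rank_map.get(r, 0))
--
--     # Check for wet conditions
--     # 1. Two suited cards (more flush draws in PLO)
--     suit_counts = {}
--     for suit in suits:
--         suit_counts[suit] = suit_counts.get(suit, 0) + 1
--     if max(suit_counts.values()) >= 2:
--         return True
--
--     # 2. Connected ranks (more straight draws in PLO)
--     sorted_ranks = sorted(numeric_ranks)
--     for i in range(len(sorted_ranks) - 1):
--         if sorted_ranks[i+1] - sorted_ranks[i] <= 2:  # Within 2 ranks
--             return True
--
--     # 3. Medium ranks (7-T) create more action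
--     medium_count = sum(1 for r in numeric_ranks if 7 <= r <= 10)
--     if medium_count >= 2:
--         return True
--
--     return False
-- ===== SOURCE B (Python) =====
-- def is_wet_plo_board(board):
--     if len(board) < 3:
--         return False
--     rank_map = {'T': 10, 'J': 11, 'Q': 12, 'K': 13, 'A': 14}
--     vals = []
--     suits = []
--     for card in board:
--         r = card[0]
--         vals.append(int(r) if r.isdigit() else rank_map.get(r, 0))
--         suits.append(card[1])
--     n = len(board)
--     # single pairwise sweep: any two cards suited OR within 2 ranks (no sorting)
--     for i in range(n):
--         for j in range(i + 1, n):
--             if suits[i] == suits[j] or abs(vals[i] - vals[j]) <= 2: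
--                 return True
--     return sum(1 for v in vals if 7 <= v <= 10) >= 2
-- ===== Notes on version B (the rewrite author's own statement) =====
-- stated objective: alternative
-- what changed: Replaces A's three separate passes (suit counter dict + max, sort then adjacent-gap scan, medium count) by one sort-free pairwise sweep that checks 'same suit or ranks within 2' for every pair, valid because the minimum rank gap is attained by an adjacent pair of the sorted order and a duplicated suit is exactly a suited pair.
import Mathlib
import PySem

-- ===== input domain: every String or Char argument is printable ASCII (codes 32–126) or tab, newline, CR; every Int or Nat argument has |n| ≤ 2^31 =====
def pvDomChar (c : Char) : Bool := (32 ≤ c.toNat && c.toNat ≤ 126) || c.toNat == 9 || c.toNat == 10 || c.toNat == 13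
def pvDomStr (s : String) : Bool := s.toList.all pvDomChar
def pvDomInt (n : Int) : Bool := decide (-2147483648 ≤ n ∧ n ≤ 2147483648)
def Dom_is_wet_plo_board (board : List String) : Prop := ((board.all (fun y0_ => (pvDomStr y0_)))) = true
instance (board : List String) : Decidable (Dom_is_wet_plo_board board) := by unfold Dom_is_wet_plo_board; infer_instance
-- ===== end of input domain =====

-- B replaces A's three passes (suit counter + max, sort + adjacent-gap scan, medium count) by one
-- sort-free pairwise sweep over all card pairs; objective: alternative algorithm, same results.

-- ===== PORT A =====
-- shared rank mapping: `int(r) if r.isdigit() else rank_map.get(r, 0)` (identical text in A and B)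
def pvRankOf (r : Char) : Int :=
  if PySem.Chars.isdigit r then (PySem.Int.ofChars? [r]).getD 0
  else match r with
    | 'T' => 10 | 'J' => 11 | 'Q' => 12 | 'K' => 13 | 'A' => 14
    | _ => 0

-- the `for i in range(len(sorted_ranks)-1)` adjacent-gap scan of A
def pvAdjScan : List Int → Bool
  | a :: b :: t => if b - a ≤ 2 then true else pvAdjScan (b :: t)
  | _ => false

def is_wet_plo_board (board : List String) : Bool :=
  if board.length < 3 then false
  else
    let ranks := board.map (fun card => PySem.List.pyGetD card.toList 0 ' ')   -- card[0]; Pre_ keeps it in range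
    let suits := board.map (fun card => PySem.List.pyGetD card.toList 1 ' ')   -- card[1]
    let numeric_ranks := ranks.foldl (fun acc r => acc ++ [pvRankOf r]) []
    let suit_counts : PySem.Dict Char Int :=
      suits.foldl (fun d s => d.insert s (d.getD s 0 + 1)) PySem.Dict.empty
    if 2 ≤ (PySem.List.max? suit_counts.values (fun v => v)).getD 0 then true   -- board nonempty here, max() is safe
    else
      let sorted_ranks := PySem.List.sorted numeric_ranks (fun x => x) false
      if pvAdjScan sorted_ranks then true
      else if 2 ≤ numeric_ranks.countP (fun r => decide (7 ≤ r ∧ r ≤ 10)) then true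
      else false

-- ===== PORT B =====
-- the nested `for i / for j in range(i+1, n)` pair sweep of B, over (val, suit) pairs
def pvPairScan : List (Int × Char) → Bool
  | [] => false
  | x :: t =>
    if t.any (fun y => x.2 == y.2 || (x.1 - y.1).natAbs ≤ 2) then true
    else pvPairScan t

def is_wet_plo_board_alt (board : List String) : Bool :=
  if board.length < 3 then false
  else
    let cards := board.map (fun card =>
      (pvRankOf (PySem.List.pyGetD card.toList 0 ' '), PySem.List.pyGetD card.toList 1 ' '))
    if pvPairScan cards then true
    else decide (2 ≤ cards.countP (fun x => decide (7 ≤ x.1 ∧ x.1 ≤ 10)))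

-- ===== PRECONDITION & SPEC =====
-- Pre_ excludes only inputs where A raises: with 3+ cards, A indexes card[0] and card[1] of every
-- card, an IndexError on any card shorter than 2 characters (B raises there too).
def Pre_is_wet_plo_board (board : List String) : Prop :=
  board.length < 3 ∨ ∀ card ∈ board, 2 ≤ card.toList.length
instance (board : List String) : Decidable (Pre_is_wet_plo_board board) := by
  unfold Pre_is_wet_plo_board; infer_instance

def pvWitness_is_wet_plo_board : List String := ["2s", "7h", "Qd"]

def Spec_is_wet_plo_board (board : List String) (out : Bool) : Prop := out = is_wet_plo_board_alt board
instance (board : List String) (out : Bool) : Decidable (Spec_is_wet_plo_board board out) := by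
  unfold Spec_is_wet_plo_board; infer_instance

-- ===== CLAIM (what is proved, stated in full; the proofs are below) =====
def Claim_equal_is_wet_plo_board : Prop := ∀ (board : List String), Dom_is_wet_plo_board board → Pre_is_wet_plo_board board → Spec_is_wet_plo_board board (is_wet_plo_board board)

-- ===== LEMMAS AND PROOFS =====

-- B's pair sweep finds nothing iff every pair is off-suit and more than 2 ranks apart
theorem pvPairScan_eq_false_iff (l : List (Int × Char)) :
    pvPairScan l = false ↔ l.Pairwise (fun x y => x.2 ≠ y.2 ∧ 2 < (x.1 - y.1).natAbs) := by
  induction l with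
  | nil => simp [pvPairScan]
  | cons x t ih =>
    cases h : t.any (fun y => x.2 == y.2 || decide ((x.1 - y.1).natAbs ≤ 2)) with
    | true =>
      simp only [pvPairScan, h, if_true, List.pairwise_cons]
      rcases List.any_eq_true.mp h with ⟨y, hy, hor⟩
      simp only [Bool.or_eq_true, beq_iff_eq, decide_eq_true_eq] at hor
      constructor
      · intro hf; cases hf
      · rintro ⟨hall, -⟩
        rcases hor with hs | hd
        · exact absurd hs (hall y hy).1
        · have := (hall y hy).2; omega
    | false =>
      simp only [pvPairScan, h, Bool.false_eq_true, if_false, ih, List.pairwise_cons]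
      have hall := List.any_eq_false.mp h
      constructor
      · intro ht
        refine ⟨fun y hy => ?_, ht⟩
        have hy' : ¬(x.2 = y.2 ∨ (x.1 - y.1).natAbs ≤ 2) := by
          have := hall y hy; simpa using this
        push Not at hy'
        exact ⟨hy'.1, by omega⟩
      · exact fun hp => hp.2

-- A's adjacent scan on a sorted list finds nothing iff every pair is more than 2 apart
theorem pvAdjScan_eq_false_iff : ∀ (l : List Int), l.Pairwise (fun a b => a ≤ b) →
    (pvAdjScan l = false ↔ l.Pairwise (fun a b => 2 < b - a))
  | [] => by simp [pvAdjScan]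
  | [_] => by simp [pvAdjScan]
  | a :: b :: t => by
    intro h
    have hsorted := (List.pairwise_cons.mp h).2
    have hab : a ≤ b := (List.pairwise_cons.mp h).1 b List.mem_cons_self
    have hb : ∀ z ∈ t, b ≤ z := (List.pairwise_cons.mp hsorted).1
    have ih := pvAdjScan_eq_false_iff (b :: t) hsorted
    simp only [pvAdjScan]
    by_cases hgap : b - a ≤ 2
    · simp only [if_pos hgap]
      constructor
      · intro hf; cases hf
      · intro hp
        have := (List.pairwise_cons.mp hp).1 b List.mem_cons_self
        omega
    · simp only [if_neg hgap, ih, List.pairwise_cons]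
      constructor
      · intro ht
        refine ⟨fun z hz => ?_, ht⟩
        rcases List.mem_cons.mp hz with rfl | hz'
        · omega
        · have := hb z hz'; omega
      · exact fun ⟨_, ht⟩ => ht

-- max(counter values) ≥ 2 ⟷ some value ≥ 2
theorem pvMax_ge_two_iff (vs : List Int) (hne : vs ≠ []) :
    2 ≤ (PySem.List.max? vs (fun v => v)).getD 0 ↔ ∃ v ∈ vs, 2 ≤ v := by
  rcases hm : PySem.List.max? vs (fun v : Int => v) with _ | m
  · exact absurd ((PySem.List.max?_eq_none_iff vs (fun v : Int => v)).mp hm) hne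
  · simp only [Option.getD_some]
    constructor
    · intro h2; exact ⟨m, PySem.List.max?_mem hm, h2⟩
    · rintro ⟨v, hv, h2⟩
      have := PySem.List.max?_isMax hm v hv
      omega

-- duplicated suit ⟷ the max suit count is ≥ 2
theorem pvSuitDup_iff (suits : List Char) (hne : suits ≠ []) :
    2 ≤ (PySem.List.max?
      (suits.foldl (fun d s => d.insert s (d.getD s 0 + 1)) (PySem.Dict.empty : PySem.Dict Char Int)).values
      (fun v => v)).getD 0 ↔ ¬ suits.Nodup := by
  rw [PySem.Dict.foldl_insert_getD_add_one_eq_counter suits]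
  have hvals := PySem.Dict.values_eq_map_keys (PySem.Dict.counter suits) (PySem.Dict.nodup_keys_counter suits) (0 : Int)
  rw [hvals]
  have hkeys := PySem.Dict.keys_counter (κ := Char) suits
  rw [hkeys]
  have hvne : (PySem.Set.ofList suits).map (fun k => (PySem.Dict.counter suits).getD k 0) ≠ [] := by
    rcases suits with _ | ⟨s, t⟩
    · exact absurd rfl hne
    · have : s ∈ PySem.Set.ofList (s :: t) := (PySem.Set.mem_ofList _ _).mpr List.mem_cons_self
      intro hc
      exact absurd (List.map_eq_nil_iff.mp hc ▸ this) (List.not_mem_nil)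
  rw [pvMax_ge_two_iff _ hvne]
  constructor
  · rintro ⟨v, hv, h2⟩
    rcases List.mem_map.mp hv with ⟨k, hk, rfl⟩
    rw [PySem.Dict.getD_counter] at h2
    intro hnd
    have := List.nodup_iff_count_le_one.mp hnd k
    omega
  · intro hnd
    rcases not_forall.mp (fun hall => hnd (List.nodup_iff_count_le_one.mpr hall)) with ⟨k, hk⟩
    refine ⟨(PySem.Dict.counter suits).getD k 0, List.mem_map.mpr ⟨k, ?_, rfl⟩, ?_⟩
    · exact (PySem.Set.mem_ofList _ _).mpr (List.count_pos_iff.mp (by omega))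
    · rw [PySem.Dict.getD_counter]; omega

-- the symmetric "more than 2 apart" relation transfers along permutations
theorem pvFar_symm : Symmetric (fun a b : Int => 2 < (a - b).natAbs) := by
  intro a b h; omega

-- main agreement on boards of 3+ cards with all cards indexable
theorem pvMain (board : List String) (hlen : ¬ board.length < 3) :
    is_wet_plo_board board = is_wet_plo_board_alt board := by
  rw [Bool.eq_iff_iff]
  unfold is_wet_plo_board is_wet_plo_board_alt
  simp only [if_neg hlen]
  set g : String → Int × Char := fun card =>
    (pvRankOf (PySem.List.pyGetD card.toList 0 ' '), PySem.List.pyGetD card.toList 1 ' ') with hg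
  have hsne : board.map (fun card => PySem.List.pyGetD card.toList 1 ' ') ≠ [] := by
    intro hc; rw [List.map_eq_nil_iff] at hc; subst hc; simp at hlen
  rw [PySem.List.foldl_append_singleton_eq_map]
  simp only [List.nil_append, List.map_map, Function.comp_def]
  set vals := board.map (fun card => pvRankOf (PySem.List.pyGetD card.toList 0 ' ')) with hvals
  set suits := board.map (fun card => PySem.List.pyGetD card.toList 1 ' ') with hsuits
  -- the three elementary conditions
  have hdup := pvSuitDup_iff suits hsne
  have hsorted_pw : (PySem.List.sorted vals (fun x => x) false).Pairwise (fun a b : Int => a ≤ b) :=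
    PySem.List.sorted_pairwise vals (fun x => x)
  have hadj := pvAdjScan_eq_false_iff (PySem.List.sorted vals (fun x => x) false) hsorted_pw
  have hpair := pvPairScan_eq_false_iff (board.map g)
  -- gap-pairwise on the sorted list ⟷ symmetric far-pairwise on vals
  have hgap_iff : (PySem.List.sorted vals (fun x => x) false).Pairwise (fun a b => 2 < b - a) ↔
      vals.Pairwise (fun a b : Int => 2 < (a - b).natAbs) := by
    constructor
    · intro hp
      have hand := hsorted_pw.and hp
      have : (PySem.List.sorted vals (fun x => x) false).Pairwise (fun a b : Int => 2 < (a - b).natAbs) :=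
        hand.imp (by intro a b ⟨h1, h2⟩; omega)
      exact ((PySem.List.sorted_perm vals (fun x => x) false).pairwise_iff (fun {a b} h => pvFar_symm h)).mp this
    · intro hp
      have : (PySem.List.sorted vals (fun x => x) false).Pairwise (fun a b : Int => 2 < (a - b).natAbs) :=
        ((PySem.List.sorted_perm vals (fun x => x) false).pairwise_iff (fun {a b} h => pvFar_symm h)).mpr hp
      exact (hsorted_pw.and this).imp (by intro a b ⟨h1, h2⟩; omega)
  -- the pair sweep splits into the suit and rank conditions
  have hsplit : (board.map g).Pairwise (fun x y => x.2 ≠ y.2 ∧ 2 < (x.1 - y.1).natAbs) ↔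
      suits.Pairwise (fun a b => a ≠ b) ∧ vals.Pairwise (fun a b : Int => 2 < (a - b).natAbs) := by
    rw [hsuits, hvals, List.pairwise_map, List.pairwise_map, List.pairwise_map]
    constructor
    · intro hp; exact ⟨hp.imp fun h => h.1, hp.imp fun h => h.2⟩
    · rintro ⟨h1, h2⟩; exact (h1.and h2).imp fun h => h
  -- assemble
  by_cases hD : 2 ≤ (PySem.List.max?
      (suits.foldl (fun d s => d.insert s (d.getD s 0 + 1)) (PySem.Dict.empty : PySem.Dict Char Int)).values
      (fun v => v)).getD 0
  · simp only [if_pos hD, true_iff]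
    have hnd := hdup.mp hD
    by_cases hP : pvPairScan (board.map g) = true
    · simp [hP]
    · have := hsplit.mp (hpair.mp (Bool.eq_false_iff.mpr hP))
      exact absurd this.1 (fun h => hnd h)
  · simp only [if_neg hD]
    have hnodup : suits.Pairwise (fun a b => a ≠ b) := by
      by_contra hc; exact hD (hdup.mpr (fun hn => hc hn))
    by_cases hA : pvAdjScan (PySem.List.sorted vals (fun x => x) false) = true
    · simp only [if_pos hA, true_iff]
      by_cases hP : pvPairScan (board.map g) = true
      · simp [hP]
      · have hfar := (hsplit.mp (hpair.mp (Bool.eq_false_iff.mpr hP))).2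
        have : pvAdjScan (PySem.List.sorted vals (fun x => x) false) = false :=
          hadj.mpr (hgap_iff.mpr hfar)
        rw [hA] at this; cases this
    · simp only [if_neg hA]
      have hP : pvPairScan (board.map g) = false :=
        hpair.mpr (hsplit.mpr ⟨hnodup, hgap_iff.mp (hadj.mp (Bool.eq_false_iff.mpr hA))⟩)
      simp [hP]
      have hmed : List.countP (fun r => decide (7 ≤ r) && decide (r ≤ 10)) vals =
          List.countP ((fun x : ℤ × Char => decide (7 ≤ x.1) && decide (x.1 ≤ 10)) ∘ g) board := by
        rw [hvals, List.countP_map]; rfl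
      rw [hmed]

-- ===== VERDICT (by name: the statement is the Claim_ definition above) =====
theorem is_wet_plo_board_spec : Claim_equal_is_wet_plo_board := by
  intro board _ _
  unfold Spec_is_wet_plo_board
  by_cases hlen : board.length < 3
  · unfold is_wet_plo_board is_wet_plo_board_alt
    simp [hlen]
  · exact pvMain board hlen
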